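-- pv_equiv track=rewrite | github.com/marbl/verkko | src/scripts/get_haplo_split_nodes.py | find_telomeres
-- ===== SOURCE A (Python) =====
-- telomere_seq = "TAG"
--
-- telomere_seq_revcomp = "CTA"
--
-- telomere_end_anchorsize = 500
--
-- min_telomere_bp_count = 200
--
-- def find_telomeres(seq):
-- 	if len(seq) < telomere_end_anchorsize * 2: return (False, False)
-- 	end_count = 0
-- 	last_match = 0
-- 	for i in range(len(seq)-telomere_end_anchorsize, len(seq) - len(telomere_seq)):
-- 		if seq[i:i+len(telomere_seq)] == telomere_seq:
-- 			if i - last_match > len(telomere_seq):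
-- 				end_count += len(telomere_seq)
-- 			else:
-- 				end_count += i - last_match
-- 			last_match = i
-- 	start_count = 0
-- 	last_match = -len(telomere_seq_revcomp)
-- 	for i in range(0, telomere_end_anchorsize - len(telomere_seq)):
-- 		if seq[i:i+len(telomere_seq_revcomp)] == telomere_seq_revcomp:
-- 			if i - last_match > len(telomere_seq):
-- 				start_count += len(telomere_seq)
-- 			else:
-- 				start_count += i - last_match
-- 			last_match = i
-- 	return (end_count > min_telomere_bp_count, start_count > min_telomere_bp_count)
-- ===== SOURCE B (Python) =====
-- telomere_seq = "TAG"
--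
-- telomere_seq_revcomp = "CTA"
--
-- telomere_end_anchorsize = 500
--
-- min_telomere_bp_count = 200
--
-- def _covered_bp(seq, pattern, lo, hi):
-- 	covered = set()
-- 	for i in range(lo, hi):
-- 		if seq.startswith(pattern, i):
-- 			covered.update(range(i, i + len(pattern)))
-- 	return len(covered)
--
-- def find_telomeres(seq):
-- 	if len(seq) < telomere_end_anchorsize * 2: return (False, False)
-- 	n = len(seq)
-- 	end_count = _covered_bp(seq, telomere_seq, n - telomere_end_anchorsize, n - len(telomere_seq))
-- 	start_count = _covered_bp(seq, telomere_seq_revcomp, 0, telomere_end_anchorsize - len(telomere_seq))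
-- 	return (end_count > min_telomere_bp_count, start_count > min_telomere_bp_count)
-- ===== Notes on version B (the rewrite author's own statement) =====
-- stated objective: alternative
-- what changed: Replaces A's stateful gap-capped running sum with a last_match accumulator by a coverage computation: each telomere match marks its three bases in a set, and the count is the size of the union of the match intervals.
import Mathlib
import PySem

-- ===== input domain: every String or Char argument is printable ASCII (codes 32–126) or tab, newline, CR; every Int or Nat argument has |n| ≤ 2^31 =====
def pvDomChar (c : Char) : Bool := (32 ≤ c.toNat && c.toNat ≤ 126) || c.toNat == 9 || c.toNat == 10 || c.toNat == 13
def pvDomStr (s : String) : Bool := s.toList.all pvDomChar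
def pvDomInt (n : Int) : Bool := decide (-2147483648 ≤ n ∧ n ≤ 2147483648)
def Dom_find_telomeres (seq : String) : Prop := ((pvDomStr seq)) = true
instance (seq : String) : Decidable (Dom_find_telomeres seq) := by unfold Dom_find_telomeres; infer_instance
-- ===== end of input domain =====

-- B replaces A's stateful gap-capped running sum (last_match accumulator) by counting the
-- bases covered by the union of repeat-match intervals, collected in a set (objective: alternative).

-- ===== PORT A =====
-- one iteration of A's for-loops (both loops share this body; pat is the compared pattern,
-- 3 = len(telomere_seq); state = (count, last_match))
def aStep (s pat : List Char) (st : Int × Int) (i : Int) : Int × Int :=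
  if PySem.List.slice s (some i) (some (i + 3)) = pat then
    (st.1 + (if i - st.2 > 3 then 3 else i - st.2), i)
  else st

def find_telomeres (seq : String) : Bool × Bool :=
  if PySem.Str.len seq < 500 * 2 then (false, false)
  else
    let s := seq.toList
    let n : Int := s.length
    let endSt := (PySem.List.pyRange (n - 500) (n - 3) 1).foldl (aStep s ['T','A','G']) (0, 0)
    let startSt := (PySem.List.pyRange 0 (500 - 3) 1).foldl (aStep s ['C','T','A']) (0, -3)
    (decide (endSt.1 > 200), decide (startSt.1 > 200))

-- ===== PORT B =====
-- one iteration of _covered_bp's loop: on a match at i, mark positions i..i+2 in the set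
-- (seq.startswith(pattern, i) with 0 ≤ i is startswith on the i-suffix; both windows have i ≥ 0)
def coverStep (s pat : List Char) (cov : PySem.Set Int) (i : Int) : PySem.Set Int :=
  if PySem.Chars.startswith (s.drop i.toNat) pat then
    (PySem.List.pyRange i (i + (pat.length : Int)) 1).foldl PySem.Set.add cov
  else cov

def coveredBp (s pat : List Char) (lo hi : Int) : Int :=
  (((PySem.List.pyRange lo hi 1).foldl (coverStep s pat) PySem.Set.empty).length : Int)

def find_telomeres_alt (seq : String) : Bool × Bool :=
  if PySem.Str.len seq < 500 * 2 then (false, false)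
  else
    let s := seq.toList
    let n : Int := s.length
    let endCount := coveredBp s ['T','A','G'] (n - 500) (n - 3)
    let startCount := coveredBp s ['C','T','A'] 0 (500 - 3)
    (decide (endCount > 200), decide (startCount > 200))

-- ===== PRECONDITION & SPEC =====
def Spec_find_telomeres (seq : String) (out : Bool × Bool) : Prop := out = find_telomeres_alt seq
instance (seq : String) (out : Bool × Bool) : Decidable (Spec_find_telomeres seq out) := by unfold Spec_find_telomeres; infer_instance

-- ===== CLAIM (what is proved, stated in full; the proofs are below) =====
def Claim_equal_find_telomeres : Prop := ∀ (seq : String), Dom_find_telomeres seq → Spec_find_telomeres seq (find_telomeres seq)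

-- ===== LEMMAS AND PROOFS =====

-- "seq[i:i+3] == pat" says "pat is a prefix of s dropped at i" (pat of length 3)
lemma matchAt_iff (s pat : List Char) (hpat : pat.length = 3) (i : Int) (hi : 0 ≤ i) :
    (PySem.List.slice s (some i) (some (i + 3)) = pat) ↔ pat <+: s.drop i.toNat := by
  rw [PySem.List.slice_toNat s hi (by omega), List.prefix_iff_eq_take, hpat]
  have h3 : (i + 3).toNat - i.toNat = 3 := by omega
  rw [h3]
  exact eq_comm

-- range(i, i+3)
lemma pyRange3 (i : Int) : PySem.List.pyRange i (i + 3) 1 = [i, i + 1, i + 1 + 1] := by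
  rw [PySem.List.pyRange_one_cons (by omega), PySem.List.pyRange_one_cons (by omega),
      PySem.List.pyRange_one_cons (by omega), PySem.List.pyRange_one_eq_nil (by omega)]

-- the core window lemma: A's gap-capped sum over [a, b) equals the growth of B's covered set.
-- Invariant: cov is Nodup, every covered position is < l + 3, and (unless cov is empty, in
-- which case l + 3 ≤ a) all of [l, l+3) is covered.
lemma window_cover (s pat : List Char) (hpat : pat.length = 3) :
    ∀ m : Nat, ∀ a b c l : Int, ∀ cov : PySem.Set Int,
      (b - a).toNat = m → 0 ≤ a → l < a → cov.Nodup →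
      (∀ x ∈ cov, x < l + 3) →
      (cov = [] → l + 3 ≤ a) →
      (cov ≠ [] → ∀ x : Int, l ≤ x → x < l + 3 → x ∈ cov) →
      ((PySem.List.pyRange a b 1).foldl (aStep s pat) (c, l)).1
        = c + (((PySem.List.pyRange a b 1).foldl (coverStep s pat) cov).length - (cov.length : Int)) := by
  intro m
  induction m with
  | zero =>
    intro a b c l cov hm _ _ _ _ _ _
    rw [PySem.List.pyRange_one_eq_nil (by omega)]
    simp
  | succ m ih =>
    intro a b c l cov hm ha0 hla hnd hub hemp hfull
    rw [PySem.List.pyRange_one_cons (by omega)]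
    simp only [List.foldl_cons]
    -- unified membership criterion for positions ≥ a
    have hmem : ∀ x : Int, a ≤ x → (x ∈ cov ↔ x < l + 3) := by
      intro x hx
      constructor
      · exact hub x
      · intro hxl
        rcases eq_or_ne cov [] with h | h
        · exact absurd (le_trans (hemp h) hx) (not_le.mpr hxl)
        · exact hfull h x (by omega) hxl
    by_cases hmatch : pat <+: s.drop a.toNat
    · have hA : aStep s pat (c, l) a = (c + (if a - l > 3 then 3 else a - l), a) := by
        unfold aStep; rw [if_pos ((matchAt_iff s pat hpat a ha0).mpr hmatch)]
      have hB : coverStep s pat cov a =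
          PySem.Set.add (PySem.Set.add (PySem.Set.add cov a) (a + 1)) (a + 1 + 1) := by
        unfold coverStep
        rw [if_pos ((PySem.Chars.startswith_iff _ _).mpr hmatch), hpat]
        have h3 : ((3 : Nat) : Int) = 3 := by norm_num
        rw [h3, pyRange3]
        rfl
      rw [hA, hB]
      have hnotc2 : a + 1 + 1 ∉ cov := fun h => by
        have := (hmem _ (by omega)).mp h; omega
      -- length of the covered set after marking a, a+1, a+2
      have hlen : ((PySem.Set.add (PySem.Set.add (PySem.Set.add cov a) (a + 1)) (a + 1 + 1)).length : Int)
          = cov.length + (if a - l > 3 then 3 else a - l) := by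
        by_cases hc1 : a + 1 < l + 3
        · -- gap 1: only a+2 is new
          have h0 : a ∈ cov := (hmem a le_rfl).mpr (by omega)
          have h1 : a + 1 ∈ cov := (hmem _ (by omega)).mpr hc1
          rw [PySem.Set.add_of_mem h0, PySem.Set.add_of_mem h1,
              PySem.Set.add_of_not_mem hnotc2]
          simp only [List.length_append, List.length_cons, List.length_nil]
          push_cast; omega
        · by_cases hc0 : a < l + 3
          · -- gap 2: a+1 and a+2 are new
            have h0 : a ∈ cov := (hmem a le_rfl).mpr hc0
            have hn1 : a + 1 ∉ cov := fun h => hc1 ((hmem _ (by omega)).mp h)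
            have hn2 : a + 1 + 1 ∉ cov ++ [a + 1] := by
              simp only [List.mem_append, List.mem_singleton]
              rintro (h | h)
              · exact hnotc2 h
              · omega
            rw [PySem.Set.add_of_mem h0, PySem.Set.add_of_not_mem hn1,
                PySem.Set.add_of_not_mem hn2]
            simp only [List.length_append, List.length_cons, List.length_nil]
            push_cast; omega
          · -- gap ≥ 3: all three new
            have hn0 : a ∉ cov := fun h => hc0 ((hmem a le_rfl).mp h)
            have hn1 : a + 1 ∉ cov ++ [a] := by
              simp only [List.mem_append, List.mem_singleton]
              rintro (h | h)
              · exact hc1 ((hmem _ (by omega)).mp h)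
              · omega
            have hn2 : a + 1 + 1 ∉ (cov ++ [a]) ++ [a + 1] := by
              simp only [List.mem_append, List.mem_singleton]
              rintro ((h | h) | h)
              · exact hnotc2 h
              · omega
              · omega
            rw [PySem.Set.add_of_not_mem hn0, PySem.Set.add_of_not_mem hn1,
                PySem.Set.add_of_not_mem hn2]
            simp only [List.length_append, List.length_cons, List.length_nil]
            push_cast; omega
      -- invariants for the tail, with last match a and extended covered set
      have hnd' : (PySem.Set.add (PySem.Set.add (PySem.Set.add cov a) (a + 1)) (a + 1 + 1)).Nodup :=
        PySem.Set.nodup_add _ _ (PySem.Set.nodup_add _ _ (PySem.Set.nodup_add _ _ hnd))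
      have hub' : ∀ x ∈ PySem.Set.add (PySem.Set.add (PySem.Set.add cov a) (a + 1)) (a + 1 + 1), x < a + 3 := by
        intro x hx
        rw [PySem.Set.mem_add, PySem.Set.mem_add, PySem.Set.mem_add] at hx
        rcases hx with ((h | h) | h) | h
        · have := hub x h; omega
        all_goals omega
      have hmemc' : a ∈ PySem.Set.add (PySem.Set.add (PySem.Set.add cov a) (a + 1)) (a + 1 + 1) := by
        rw [PySem.Set.mem_add, PySem.Set.mem_add, PySem.Set.mem_add]; tauto
      have hfull' : ∀ x : Int, a ≤ x → x < a + 3 →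
          x ∈ PySem.Set.add (PySem.Set.add (PySem.Set.add cov a) (a + 1)) (a + 1 + 1) := by
        intro x hx1 hx2
        rw [PySem.Set.mem_add, PySem.Set.mem_add, PySem.Set.mem_add]
        rcases (by omega : x = a ∨ x = a + 1 ∨ x = a + 1 + 1) with h | h | h <;> subst h <;> tauto
      have hih := ih (a + 1) b (c + (if a - l > 3 then 3 else a - l)) a
        (PySem.Set.add (PySem.Set.add (PySem.Set.add cov a) (a + 1)) (a + 1 + 1))
        (by omega) (by omega) (by omega) hnd' hub'
        (fun h => absurd h (List.ne_nil_of_mem hmemc')) (fun _ => hfull')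
      rw [hih, hlen]
      ring
    · -- no match at a: both folds keep their state
      have hA : aStep s pat (c, l) a = (c, l) := by
        unfold aStep
        rw [if_neg (fun h => hmatch ((matchAt_iff s pat hpat a ha0).mp h))]
      have hB : coverStep s pat cov a = cov := by
        unfold coverStep
        rw [if_neg (fun h => hmatch ((PySem.Chars.startswith_iff _ _).mp h))]
      rw [hA, hB]
      exact ih (a + 1) b c l cov (by omega) (by omega) (by omega) hnd hub
        (fun h => by have := hemp h; omega) hfull

-- ===== VERDICT (by name: the statement is the Claim_ definition above) =====
theorem find_telomeres_spec : Claim_equal_find_telomeres := by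
  intro seq _
  unfold Spec_find_telomeres find_telomeres find_telomeres_alt coveredBp
  have hlen : PySem.Str.len seq = (seq.toList.length : Int) := PySem.Str.len_eq seq
  rw [hlen]
  split_ifs with h1
  · rfl
  · simp only []
    have hE := window_cover seq.toList ['T','A','G'] rfl 497
      ((seq.toList.length : Int) - 500) ((seq.toList.length : Int) - 3) 0 0 PySem.Set.empty
      (by omega) (by omega) (by omega) List.nodup_nil (fun x hx => absurd hx (List.not_mem_nil))
      (fun _ => by omega) (fun h => absurd rfl h)
    have hS := window_cover seq.toList ['C','T','A'] rfl 497
      0 (500 - 3) 0 (-3) PySem.Set.empty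
      (by omega) (by omega) (by omega) List.nodup_nil (fun x hx => absurd hx (List.not_mem_nil))
      (fun _ => by omega) (fun h => absurd rfl h)
    rw [hE, hS]
    simp only [PySem.Set.empty, List.length_nil, Nat.cast_zero, sub_zero, zero_add]
    rfl
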